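-- pv_equiv track=rewrite | github.com/Roger-Wu/lottery-problem-verifier | src/combination_index_utils.py | calculate_combination_index
-- ===== SOURCE A (Python) =====
-- from typing import Tuple
-- import math
--
-- def calculate_combination_index(combination: Tuple[int, ...], total_numbers: int) -> int:
--     """
--     Calculate the index of a combination in the list of all combinations
--     which is list(combinations(range(total_numbers), combo_length).
--
--     We calculate the index by counting the combinations skipped before the given combination.
--     For example, if combination = (5, 10, 17, 28) and total_numbers = 30
--     Then we skipped from (0, 1, 2, 3) to (5, 6, 7, 8)
--         = skipped comb(29, 3) + comb(28, 3) + comb(27, 3) + comb(26, 3) + comb(25, 3)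
--         = skipped comb(30 - 0, 4) - comb(30 - 5, 4)
--     Then from (5, 6, 7, 8) to (5, 10, 11, 12)
--         = skipped comb(30 - 6, 3) - comb(30 - 10, 3)
--     Then from (5, 10, 11, 12) to (5, 10, 17, 18)
--     Then from (5, 10, 17, 18) to (5, 10, 17, 28)
--
--     We can instantly calculate (comb(n, k) + comb(n+1, k) + ... + comb(m, k))
--     using hockey stick theorem (aka hockey-stick identity)
--     The sum is (comb(m+1, k+1) - comb(n, k+1))
--     """
--     combo_length = len(combination)
--     combo_index = 0
--
--     for position, current_number in enumerate(combination):
--         previous_number = combination[position - 1] if position > 0 else -1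
--         combo_index += (
--             math.comb(total_numbers - previous_number - 1, combo_length - position)
--             - math.comb(total_numbers - current_number, combo_length - position)
--         )
--
--     return combo_index
-- ===== SOURCE B (Python) =====
-- import math
--
-- def calculate_combination_index(combination, total_numbers):
--     # Complement counting: of the comb(total_numbers, k) combinations, those NOT before
--     # `combination` are counted by the position-wise tail counts comb(total_numbers-1-c, k-i),
--     # so the rank is the total minus that sum minus one (the combination itself).
--     combo_length = len(combination)
--     skipped_after = sum(math.comb(total_numbers - 1 - number, combo_length - position)
--                         for position, number in enumerate(combination))
--     return math.comb(total_numbers, combo_length) - 1 - skipped_after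
-- ===== Notes on version B (the rewrite author's own statement) =====
-- stated objective: simpler
-- what changed: B replaces A's hockey-stick telescoping loop (difference of two binomials per position, previous element fetched by index) with complement counting: rank = comb(total_numbers, k) - 1 - sum of comb(total_numbers-1-c_i, k-i), one independent term per element with no previous-element tracking.
-- outside the precondition, e.g. on calculate_combination_index((), -1): A returns 0, B raises ValueError; on calculate_combination_index((5,), 5): A returns 5, B raises ValueError
import Mathlib
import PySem

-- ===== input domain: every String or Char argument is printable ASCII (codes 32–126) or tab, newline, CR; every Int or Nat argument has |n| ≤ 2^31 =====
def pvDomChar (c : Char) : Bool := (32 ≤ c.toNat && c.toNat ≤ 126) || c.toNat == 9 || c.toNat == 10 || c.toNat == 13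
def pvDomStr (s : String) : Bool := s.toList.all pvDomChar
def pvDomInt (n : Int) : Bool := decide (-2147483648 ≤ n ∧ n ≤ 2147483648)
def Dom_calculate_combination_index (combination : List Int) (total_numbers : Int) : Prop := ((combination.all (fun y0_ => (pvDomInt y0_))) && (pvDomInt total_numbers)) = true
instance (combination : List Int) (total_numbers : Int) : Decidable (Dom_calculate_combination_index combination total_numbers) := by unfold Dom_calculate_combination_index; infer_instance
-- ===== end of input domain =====

-- B replaces A's hockey-stick telescoping loop with complement counting
-- (total minus one minus one independent binomial term per element); simpler, not faster.

-- math.comb n k for nonnegative n, k (exact there; math.comb raises on negative arguments,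
-- and Pre_ keeps every argument reached by both programs nonnegative)
def pycomb (n k : Int) : Int :=
  if 0 ≤ n ∧ 0 ≤ k then ((n.toNat.choose k.toNat : Nat) : Int) else 0

-- ===== PORT A =====
def calculate_combination_index (combination : List Int) (total_numbers : Int) : Int :=
  (PySem.List.enumerate combination 0).foldl
    (fun combo_index pc =>
      combo_index +
        (pycomb (total_numbers - (if pc.1 > 0 then PySem.List.pyGetD combination (pc.1 - 1) 0 else -1) - 1)
            ((combination.length : Int) - pc.1)
         - pycomb (total_numbers - pc.2) ((combination.length : Int) - pc.1)))
    0

-- ===== PORT B =====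
def calculate_combination_index_alt (combination : List Int) (total_numbers : Int) : Int :=
  pycomb total_numbers (combination.length : Int) - 1 -
    ((PySem.List.enumerate combination 0).map
      (fun pc => pycomb (total_numbers - 1 - pc.2) ((combination.length : Int) - pc.1))).sum

-- ===== PRECONDITION & SPEC =====
-- Pre_ is the inputs on which every math.comb argument of BOTH programs is nonnegative;
-- it excludes inputs where A raises ValueError, and also the corner inputs where A returns
-- but B raises, namely an empty combination with negative total_numbers and a combination
-- whose LAST element equals total_numbers (cited in claim.json).
def Pre_calculate_combination_index (combination : List Int) (total_numbers : Int) : Prop :=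
  0 ≤ total_numbers ∧ ∀ x ∈ combination, x < total_numbers
instance (combination : List Int) (total_numbers : Int) : Decidable (Pre_calculate_combination_index combination total_numbers) := by unfold Pre_calculate_combination_index; infer_instance

def pvWitness_calculate_combination_index : List Int × Int := ([1, 3, 4], 6)

def Spec_calculate_combination_index (combination : List Int) (total_numbers : Int) (out : Int) : Prop := out = calculate_combination_index_alt combination total_numbers
instance (combination : List Int) (total_numbers : Int) (out : Int) : Decidable (Spec_calculate_combination_index combination total_numbers out) := by unfold Spec_calculate_combination_index; infer_instance

-- ===== CLAIM (what is proved, stated in full; the proofs are below) =====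
def Claim_equal_calculate_combination_index : Prop := ∀ (combination : List Int) (total_numbers : Int), Dom_calculate_combination_index combination total_numbers → Pre_calculate_combination_index combination total_numbers → Spec_calculate_combination_index combination total_numbers (calculate_combination_index combination total_numbers)

-- ===== LEMMAS AND PROOFS =====

-- closed form of A's fold (s = position, prev = previous chosen value)
def specA (T K : Int) : Int → Int → List Int → Int
  | _, _, [] => 0
  | s, prev, c :: rest =>
      (pycomb (T - prev - 1) (K - s) - pycomb (T - c) (K - s)) + specA T K (s + 1) c rest

lemma pycomb_pascal (n e : Int) (hn : 0 ≤ n) (he : 1 ≤ e) :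
    pycomb (n + 1) e = pycomb n e + pycomb n (e - 1) := by
  unfold pycomb
  rw [if_pos ⟨by omega, by omega⟩, if_pos ⟨hn, by omega⟩, if_pos ⟨hn, by omega⟩]
  have h1 : (n + 1).toNat = n.toNat + 1 := by omega
  have h2 : e.toNat = (e - 1).toNat + 1 := by omega
  rw [h1, h2, Nat.choose_succ_succ]
  push_cast
  ring

lemma pycomb_zero (n : Int) (hn : 0 ≤ n) : pycomb n 0 = 1 := by
  unfold pycomb
  rw [if_pos ⟨hn, le_refl 0⟩]
  simp

lemma A_aux (T : Int) (full : List Int) :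
    ∀ (m n : Nat) (acc : Int), m = full.length - n →
      (PySem.List.enumerate (full.drop n) (n : Int)).foldl
        (fun combo_index pc =>
          combo_index +
            (pycomb (T - (if pc.1 > 0 then PySem.List.pyGetD full (pc.1 - 1) 0 else -1) - 1)
                ((full.length : Int) - pc.1)
             - pycomb (T - pc.2) ((full.length : Int) - pc.1)))
        acc
      = acc + specA T full.length (n : Int)
          (if n = 0 then -1 else PySem.List.pyGetD full ((n : Int) - 1) 0) (full.drop n) := by
  intro m
  induction m with
  | zero =>
      intro n acc hm
      have hnil : full.drop n = [] := List.drop_eq_nil_of_le (by omega)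
      rw [hnil]
      simp [PySem.List.enumerate_nil, specA]
  | succ m ih =>
      intro n acc hm
      have hn : n < full.length := by omega
      have hdrop : full.drop n = full[n] :: full.drop (n + 1) := List.drop_eq_getElem_cons hn
      rw [hdrop, PySem.List.enumerate_cons]
      simp only [List.foldl_cons]
      have hcast : (n : Int) + 1 = ((n + 1 : Nat) : Int) := by push_cast; ring
      rw [hcast, ih (n + 1) _ (by omega)]
      have hprev : (if n + 1 = 0 then (-1 : Int) else PySem.List.pyGetD full (((n + 1 : Nat) : Int) - 1) 0)
          = full[n] := by
        rw [if_neg (Nat.succ_ne_zero n)]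
        have h1 : ((n + 1 : Nat) : Int) - 1 = ((n : Nat) : Int) := by push_cast; ring
        rw [h1]
        simp [hn, PySem.List.pyGetD_eq_getElem]
      rw [hprev]
      simp only [specA]
      rw [← hcast]
      by_cases hn0 : n = 0
      · subst hn0; norm_num; ring
      · rw [if_neg hn0, if_pos (show ((n : Nat) : Int) > 0 by omega)]
        ring

-- A's telescoping sum equals the complement-counting closed form
lemma specA_closed (T K : Int) :
    ∀ (l : List Int) (s prev : Int),
      0 ≤ T - prev - 1 → (∀ x ∈ l, x < T) → (l.length : Int) = K - s →
      specA T K s prev l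
        = pycomb (T - prev - 1) (K - s) - 1 -
            ((PySem.List.enumerate l s).map
              (fun pc => pycomb (T - 1 - pc.2) (K - pc.1))).sum := by
  intro l
  induction l with
  | nil =>
      intro s prev hprev _ hlen
      have h0 : K - s = 0 := by simpa using hlen.symm
      rw [h0, pycomb_zero _ hprev]
      simp [PySem.List.enumerate_nil, specA]
  | cons c rest ih =>
      intro s prev hprev hbnd hlen
      have hc : c < T := hbnd c (List.mem_cons_self ..)
      have hlen' : (rest.length : Int) = K - (s + 1) := by simp at hlen ⊢; omega
      have he : 1 ≤ K - s := by simp at hlen; omega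
      simp only [specA]
      rw [ih (s + 1) c (by omega) (fun x hx => hbnd x (List.mem_cons_of_mem _ hx)) hlen']
      rw [PySem.List.enumerate_cons]
      simp only [List.map_cons, List.sum_cons]
      have hp : pycomb (T - c) (K - s)
          = pycomb (T - c - 1) (K - s) + pycomb (T - c - 1) (K - s - 1) := by
        have := pycomb_pascal (T - c - 1) (K - s) (by omega) he
        have harg : T - c - 1 + 1 = T - c := by ring
        rw [harg] at this
        exact this
      have h1 : K - (s + 1) = K - s - 1 := by ring
      have h2 : T - 1 - c = T - c - 1 := by ring
      rw [h1, h2, hp]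
      ring

-- ===== VERDICT (by name: the statement is the Claim_ definition above) =====
theorem calculate_combination_index_spec : Claim_equal_calculate_combination_index := by
  intro combination total_numbers _ hpre
  unfold Spec_calculate_combination_index
  unfold Pre_calculate_combination_index at hpre
  unfold calculate_combination_index calculate_combination_index_alt
  have hA := A_aux total_numbers combination (combination.length) 0 0 (by omega)
  simp only [List.drop_zero, Nat.cast_zero, if_true] at hA
  rw [hA]
  have hclosed := specA_closed total_numbers (combination.length : Int) combination 0 (-1)
    (by omega) (fun x hx => hpre.2 x hx) (by omega)
  rw [hclosed]
  have harg : total_numbers - (-1) - 1 = total_numbers := by ring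
  rw [harg]
  ring
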